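-- pv_equiv track=rewrite | github.com/FazeelUsmani/Scaler-Academy | 015 Hashing 1/countTriangles.py | solve
-- ===== SOURCE A (Python) =====
-- def solve(A, B):
--
--     x,y = {}, {}
--     n = len(A)
--
--     for i in range(n):
--         if A[i] in x:
--             x[ A[i] ] += 1
--         else:
--             x[ A[i] ] = 1
--
--         if B[i] in y:
--             y[ B[i] ] += 1
--         else:
--             y[ B[i] ] = 1
--
--     cnt = 0
--     for i in range(n):
--         n = x[ A[i] ]
--         m = y[ B[i] ]
--
--         cnt = (cnt + (n-1)*(m-1)) % 1000000007
--
--     return cnt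
-- ===== SOURCE B (Python) =====
-- MOD = 1000000007
--
-- def solve(A, B):
--     x, y, pairs = {}, {}, {}
--     for a, b in zip(A, B):
--         x[a] = x.get(a, 0) + 1
--         y[b] = y.get(b, 0) + 1
--         pairs[(a, b)] = pairs.get((a, b), 0) + 1
--     total = 0
--     for (a, b), c in pairs.items():
--         total += c * (x[a] - 1) * (y[b] - 1)
--     return total % MOD
-- ===== Notes on version B (the rewrite author's own statement) =====
-- stated objective: alternative
-- what changed: B builds x, y and a counter of (a,b) pairs in one pass over zip(A,B), then sums c*(x[a]-1)*(y[b]-1) over the distinct pairs with a single mod at the end, instead of A's second pass over every index with a mod at each step.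
import Mathlib
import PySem

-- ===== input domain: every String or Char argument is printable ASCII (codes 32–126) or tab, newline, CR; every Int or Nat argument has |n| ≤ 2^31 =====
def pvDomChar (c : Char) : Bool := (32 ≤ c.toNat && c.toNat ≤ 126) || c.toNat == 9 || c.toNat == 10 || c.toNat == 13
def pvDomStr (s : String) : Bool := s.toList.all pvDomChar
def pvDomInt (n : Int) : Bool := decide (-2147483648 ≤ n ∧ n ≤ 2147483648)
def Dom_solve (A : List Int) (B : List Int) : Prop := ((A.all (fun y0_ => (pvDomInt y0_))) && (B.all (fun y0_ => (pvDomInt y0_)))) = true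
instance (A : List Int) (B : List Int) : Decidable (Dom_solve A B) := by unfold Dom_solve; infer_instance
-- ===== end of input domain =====

-- B replaces A's second pass over every index (mod taken at each step) by one pass over the
-- distinct coordinate pairs grouped in a counter, with a single mod at the end (objective: alternative).

-- ===== PORT A =====
def solve (A : List Int) (B : List Int) : Int :=
  let n : Int := (A.length : Int)
  -- first loop: build the two frequency dicts x, y over indices 0..n-1
  let xy := (PySem.List.pyRange 0 n).foldl
    (fun (st : PySem.Dict Int Int × PySem.Dict Int Int) i =>
      let a := PySem.List.pyGetD A i 0   -- A[i]; i is always in range for A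
      let b := PySem.List.pyGetD B i 0   -- B[i]; in range exactly under Pre_solve (else Python raises IndexError)
      ((if st.1.contains a then st.1.insert a (st.1.getD a 0 + 1) else st.1.insert a 1),
       (if st.2.contains b then st.2.insert b (st.2.getD b 0 + 1) else st.2.insert b 1)))
    (PySem.Dict.empty, PySem.Dict.empty)
  -- second loop: cnt = (cnt + (n-1)*(m-1)) % 1000000007 at each index
  (PySem.List.pyRange 0 n).foldl
    (fun cnt i =>
      PySem.Int.mod
        (cnt + (xy.1.getD (PySem.List.pyGetD A i 0) 0 - 1) * (xy.2.getD (PySem.List.pyGetD B i 0) 0 - 1))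
        1000000007)
    0

-- ===== PORT B =====
def solve_alt (A : List Int) (B : List Int) : Int :=
  -- one loop over zip(A, B) building x, y and the pair counter
  let st := (A.zip B).foldl
    (fun (st : PySem.Dict Int Int × PySem.Dict Int Int × PySem.Dict (Int × Int) Int) p =>
      (st.1.insert p.1 (st.1.getD p.1 0 + 1),
       st.2.1.insert p.2 (st.2.1.getD p.2 0 + 1),
       st.2.2.insert p (st.2.2.getD p 0 + 1)))
    (PySem.Dict.empty, PySem.Dict.empty, PySem.Dict.empty)
  -- one pass over the distinct pairs and their counts
  let total := st.2.2.items.foldl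
    (fun acc pc => acc + pc.2 * (st.1.getD pc.1.1 0 - 1) * (st.2.1.getD pc.1.2 0 - 1)) 0
  PySem.Int.mod total 1000000007

-- ===== PRECONDITION & SPEC =====
-- A indexes B[i] for every i < len(A), so it raises IndexError iff len(B) < len(A); Pre_ excludes exactly those inputs.
def Pre_solve (A : List Int) (B : List Int) : Prop := A.length ≤ B.length
instance (A : List Int) (B : List Int) : Decidable (Pre_solve A B) := by unfold Pre_solve; infer_instance
def pvWitness_solve : List Int × List Int := ([1, 2, 1], [3, 4, 4])

def Spec_solve (A : List Int) (B : List Int) (out : Int) : Prop := out = solve_alt A B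
instance (A : List Int) (B : List Int) (out : Int) : Decidable (Spec_solve A B out) := by unfold Spec_solve; infer_instance

-- ===== CLAIM (what is proved, stated in full; the proofs are below) =====
def Claim_equal_solve : Prop := ∀ (A : List Int) (B : List Int), Dom_solve A B → Pre_solve A B → Spec_solve A B (solve A B)

-- ===== LEMMAS AND PROOFS =====

-- both programs compute this residue: the per-pair sum over zip(A, B) of (count_A(a)-1)*(count_{B[:len A]}(b)-1), mod 1e9+7
def pvCanon (A : List Int) (B : List Int) : Int :=
  ((A.zip B).map (fun p =>
      ((A.count p.1 : Int) - 1) * (((B.take A.length).count p.2 : Int) - 1))).sum % 1000000007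

-- A's per-step-mod accumulation equals one final mod
theorem pv_foldl_pymod (ts : List Int) : ∀ c : Int, c % 1000000007 = c →
    ts.foldl (fun acc t => PySem.Int.mod (acc + t) 1000000007) c
      = (c + ts.sum) % 1000000007 := by
  induction ts with
  | nil => intro c hc; simpa using hc.symm
  | cons t ts ih =>
      intro c hc
      simp only [List.foldl_cons]
      rw [PySem.Int.mod_eq_emod_of_pos (by norm_num),
          ih ((c + t) % 1000000007) (Int.emod_emod_of_dvd _ dvd_rfl),
          Int.emod_add_emod]
      simp [add_assoc]

-- A's "if key in d: d[k]+=1 else: d[k]=1" is the counter step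
theorem pv_insert_count_step {κ : Type} [BEq κ] [LawfulBEq κ] (d : PySem.Dict κ Int) (a : κ) :
    (if d.contains a then d.insert a (d.getD a 0 + 1) else d.insert a 1)
      = d.insert a (d.getD a 0 + 1) := by
  cases hc : d.contains a with
  | true => simp
  | false => simp [PySem.Dict.getD_of_not_contains _ _ hc]

theorem pv_range_map_pyGetD (L : List Int) (n : Nat) (h : n ≤ L.length) :
    (List.range n).map (fun (i : Nat) => PySem.List.pyGetD L (i : Int) 0) = L.take n := by
  apply List.ext_getElem
  · simp only [List.length_map, List.length_range, List.length_take]; omega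
  · intro i h1 h2
    simp only [List.getElem_map, List.getElem_range, PySem.List.pyGetD_natCast,
      List.getElem_take]
    have hi : i < L.length := by
      simp only [List.length_map, List.length_range] at h1; omega
    exact List.getD_eq_getElem L 0 hi

theorem pv_map_snd_zip_take (A B : List Int) :
    (A.zip B).map Prod.snd = B.take A.length := by
  apply List.ext_getElem
  · simp only [List.length_map, List.length_zip, List.length_take]
  · intro i h1 h2
    simp [List.getElem_zip]

theorem pv_sum_ite_single {κ : Type} [BEq κ] [LawfulBEq κ] (g : κ → Int) (p : κ) :
    ∀ (s : List κ), s.Nodup → p ∈ s →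
      (s.map (fun k => if k == p then g k else 0)).sum = g p := by
  intro s
  induction s with
  | nil => intro _ hp; simp at hp
  | cons a s ih =>
      intro hnd hp
      simp only [List.map_cons, List.sum_cons]
      by_cases ha : a = p
      · subst ha
        have hnotin : a ∉ s := (List.nodup_cons.mp hnd).1
        have : (s.map (fun k => if k == a then g k else 0)).sum = 0 := by
          apply List.sum_eq_zero
          intro x hx
          obtain ⟨k, hk, rfl⟩ := List.mem_map.mp hx
          have : ¬ (k = a) := fun h => hnotin (h ▸ hk)
          simp [this]
        simp [this]
      · have hp' : p ∈ s := by
          rcases List.mem_cons.mp hp with h | h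
          · exact absurd h.symm ha
          · exact h
        rw [ih (List.nodup_cons.mp hnd).2 hp']
        simp [ha]

-- grouping: summing count(k)·g(k) over the distinct elements of P equals summing g over P
theorem pv_sum_count_mul {κ : Type} [BEq κ] [LawfulBEq κ] (g : κ → Int) :
    ∀ (P : List κ) (s : List κ), s.Nodup → (∀ x ∈ P, x ∈ s) →
      (s.map (fun k => (List.count k P : Int) * g k)).sum = (P.map g).sum := by
  intro P
  induction P with
  | nil => intro s _ _; simp
  | cons p t ih =>
      intro s hnd hsub
      have hstep : (s.map (fun k => (List.count k (p :: t) : Int) * g k)).sum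
          = (s.map (fun k => (List.count k t : Int) * g k
              + (if k == p then g k else 0))).sum := by
        apply congrArg
        apply List.map_congr_left
        intro k _
        rw [List.count_cons]
        push_cast
        by_cases hk : k = p
        · subst hk; simp [add_mul]
        · have : ¬ (p = k) := fun h => hk h.symm
          simp [this, hk]
      rw [hstep, PySem.List.sum_map_add_int,
          ih s hnd (fun x hx => hsub x (List.mem_cons_of_mem _ hx)),
          pv_sum_ite_single g p s hnd (hsub p (List.mem_cons_self))]
      simp [add_comm]

theorem pv_solve_eq (A B : List Int) (h : A.length ≤ B.length) :
    solve A B = pvCanon A B := by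
  unfold solve
  dsimp only
  simp only [PySem.List.pyRange_zero_natCast, List.foldl_map, pv_insert_count_step]
  rw [PySem.List.foldl_prod_mk
        (f := fun (d : PySem.Dict Int Int) (i : Nat) =>
          d.insert (PySem.List.pyGetD A (i : Int) 0) (d.getD (PySem.List.pyGetD A (i : Int) 0) 0 + 1))
        (g := fun (d : PySem.Dict Int Int) (i : Nat) =>
          d.insert (PySem.List.pyGetD B (i : Int) 0) (d.getD (PySem.List.pyGetD B (i : Int) 0) 0 + 1))]
  rw [← List.foldl_map (f := fun i : Nat => PySem.List.pyGetD A (i : Int) 0)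
        (g := fun (d : PySem.Dict Int Int) a => d.insert a (d.getD a 0 + 1)),
      ← List.foldl_map (f := fun i : Nat => PySem.List.pyGetD B (i : Int) 0)
        (g := fun (d : PySem.Dict Int Int) b => d.insert b (d.getD b 0 + 1)),
      pv_range_map_pyGetD A A.length le_rfl, pv_range_map_pyGetD B A.length h,
      List.take_length,
      PySem.Dict.foldl_insert_getD_add_one_eq_counter,
      PySem.Dict.foldl_insert_getD_add_one_eq_counter]
  dsimp only
  rw [← List.foldl_map
        (f := fun i : Nat =>
          ((PySem.Dict.counter A).getD (PySem.List.pyGetD A (i : Int) 0) 0 - 1)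
            * ((PySem.Dict.counter (B.take A.length)).getD (PySem.List.pyGetD B (i : Int) 0) 0 - 1))
        (g := fun (acc t : Int) => PySem.Int.mod (acc + t) 1000000007)]
  rw [pv_foldl_pymod _ 0 (by norm_num)]
  unfold pvCanon
  rw [Int.zero_add]
  refine congrArg (fun s : Int => s % 1000000007) ?_
  refine congrArg List.sum ?_
  apply List.ext_getElem
  · simp only [List.length_map, List.length_range, List.length_zip]; omega
  · intro i h1 h2
    have hiA : i < A.length := by
      simp only [List.length_map, List.length_range] at h1; exact h1
    have hiB : i < B.length := by omega
    simp only [List.getElem_map, List.getElem_range, List.getElem_zip]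
    rw [PySem.List.pyGetD_natCast, PySem.List.pyGetD_natCast,
        List.getD_eq_getElem A 0 hiA, List.getD_eq_getElem B 0 hiB,
        PySem.Dict.getD_counter, PySem.Dict.getD_counter]

theorem pv_solve_alt_eq (A B : List Int) (h : A.length ≤ B.length) :
    solve_alt A B = pvCanon A B := by
  unfold solve_alt
  dsimp only
  rw [PySem.List.foldl_prod_mk
        (f := fun (d : PySem.Dict Int Int) (p : Int × Int) => d.insert p.1 (d.getD p.1 0 + 1))
        (g := fun (st : PySem.Dict Int Int × PySem.Dict (Int × Int) Int) (p : Int × Int) =>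
          (st.1.insert p.2 (st.1.getD p.2 0 + 1), st.2.insert p (st.2.getD p 0 + 1)))]
  rw [PySem.List.foldl_prod_mk
        (f := fun (d : PySem.Dict Int Int) (p : Int × Int) => d.insert p.2 (d.getD p.2 0 + 1))
        (g := fun (d : PySem.Dict (Int × Int) Int) (p : Int × Int) => d.insert p (d.getD p 0 + 1))]
  rw [← List.foldl_map (f := (Prod.fst : Int × Int → Int))
        (g := fun (d : PySem.Dict Int Int) a => d.insert a (d.getD a 0 + 1)),
      ← List.foldl_map (f := (Prod.snd : Int × Int → Int))
        (g := fun (d : PySem.Dict Int Int) b => d.insert b (d.getD b 0 + 1)),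
      List.map_fst_zip h, pv_map_snd_zip_take A B,
      PySem.Dict.foldl_insert_getD_add_one_eq_counter,
      PySem.Dict.foldl_insert_getD_add_one_eq_counter,
      PySem.Dict.foldl_insert_getD_add_one_eq_counter]
  dsimp only
  rw [PySem.List.foldl_add
        (g := fun pc : (Int × Int) × Int =>
          pc.2 * ((PySem.Dict.counter A).getD pc.1.1 0 - 1)
               * ((PySem.Dict.counter (B.take A.length)).getD pc.1.2 0 - 1))]
  rw [PySem.Dict.items_counter, List.map_map, Int.zero_add]
  unfold pvCanon
  rw [PySem.Int.mod_eq_emod_of_pos (by norm_num)]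
  congr 1
  rw [← pv_sum_count_mul
        (fun p : Int × Int => ((A.count p.1 : Int) - 1) * (((B.take A.length).count p.2 : Int) - 1))
        (A.zip B) (PySem.Set.ofList (A.zip B)) (PySem.Set.nodup_ofList _)
        (fun x hx => (PySem.Set.mem_ofList _ x).mpr hx)]
  refine congrArg List.sum ?_
  apply List.map_congr_left
  intro k _
  simp only [Function.comp_apply, PySem.Dict.getD_counter]
  ring

-- ===== VERDICT (by name: the statement is the Claim_ definition above) =====
theorem solve_spec : Claim_equal_solve := by
  intro A B _ hpre
  unfold Spec_solve
  rw [pv_solve_eq A B hpre, pv_solve_alt_eq A B hpre]
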